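-- pv_equiv track=rewrite | github.com/ManuelSaenz22100/sistemasOperativos1 | so2.py | calcular_turnaround_waiting_time
-- ===== SOURCE A (Python) =====
-- def calcular_turnaround_waiting_time(procesos):
--     n = len(procesos)
--     tiempo_actual = 0
--     turnaround_times = []
--     waiting_times = []
--
--     for proceso in procesos:
--         if tiempo_actual < proceso['ArrivalTime']:
--             tiempo_actual = proceso['ArrivalTime']
--
--         turnaround_time = tiempo_actual + proceso['BurstTime'] - proceso['ArrivalTime']
--         waiting_time = turnaround_time - proceso['BurstTime']
--
--         turnaround_times.append(turnaround_time)
--         waiting_times.append(waiting_time)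
--
--         tiempo_actual += proceso['BurstTime']
--
--     return turnaround_times, waiting_times
-- ===== SOURCE B (Python) =====
-- def calcular_turnaround_waiting_time(procesos):
--     # Closed form instead of the FCFS clock recurrence: with S_i = sum of bursts
--     # before process i and M_i = max(0, max_{j<=i}(arrival_j - S_j)), the start
--     # time of process i is M_i + S_i, hence
--     #   waiting_i    = M_i + S_i - arrival_i
--     #   turnaround_i = waiting_i + burst_i
--     arrivals = [p['ArrivalTime'] for p in procesos]
--     bursts = [p['BurstTime'] for p in procesos]
--     n = len(procesos)
--     prefixes = [0] * n
--     for i in range(1, n):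
--         prefixes[i] = prefixes[i - 1] + bursts[i - 1]
--     maxes = [0] * n
--     m = 0
--     for i in range(n):
--         m = max(m, arrivals[i] - prefixes[i])
--         maxes[i] = m
--     waiting_times = [m + s - a for m, s, a in zip(maxes, prefixes, arrivals)]
--     turnaround_times = [w + b for w, b in zip(waiting_times, bursts)]
--     return turnaround_times, waiting_times
-- ===== Notes on version B (the rewrite author's own statement) =====
-- stated objective: alternative
-- what changed: B replaces A's clock-clamping recurrence (tiempo_actual = max(clock, arrival); ...; clock += burst) by a closed form: it builds the prefix-sum table S of bursts and the running maximum M of (arrival_j - S_j), then derives waiting_i = M_i + S_i - arrival_i and turnaround_i = waiting_i + burst_i by zip comprehensions.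
import Mathlib
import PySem

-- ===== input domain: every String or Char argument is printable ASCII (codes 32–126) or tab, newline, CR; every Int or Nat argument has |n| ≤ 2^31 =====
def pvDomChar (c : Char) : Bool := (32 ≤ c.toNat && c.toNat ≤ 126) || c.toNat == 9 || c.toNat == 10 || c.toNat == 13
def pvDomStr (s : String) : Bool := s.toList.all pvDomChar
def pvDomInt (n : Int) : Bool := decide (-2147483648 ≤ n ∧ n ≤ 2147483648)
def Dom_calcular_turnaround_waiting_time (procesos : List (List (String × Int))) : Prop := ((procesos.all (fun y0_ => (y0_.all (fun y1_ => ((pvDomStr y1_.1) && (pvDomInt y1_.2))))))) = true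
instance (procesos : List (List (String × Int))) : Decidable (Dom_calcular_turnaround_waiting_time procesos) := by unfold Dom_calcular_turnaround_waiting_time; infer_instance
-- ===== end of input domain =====

-- B replaces A's clock-clamping recurrence by a closed form via prefix burst sums
-- and a running maximum of (arrival_j - S_j) (alternative algorithm, same cost).

-- ===== PORT A =====
-- dict lookup proceso['Key'] (first match in the association list; Pre_ guarantees presence)
def pvArrival (p : List (String × Int)) : Int := (p.lookup "ArrivalTime").getD 0
def pvBurst (p : List (String × Int)) : Int := (p.lookup "BurstTime").getD 0

-- A's for-loop, threading tiempo_actual and emitting both metrics per process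
def pvGoA (t : Int) : List (List (String × Int)) → List Int × List Int
  | [] => ([], [])
  | p :: ps =>
    let t' := if t < pvArrival p then pvArrival p else t
    let turnaround := t' + pvBurst p - pvArrival p
    let waiting := turnaround - pvBurst p
    let rest := pvGoA (t' + pvBurst p) ps
    (turnaround :: rest.1, waiting :: rest.2)

def calcular_turnaround_waiting_time (procesos : List (List (String × Int))) : List Int × List Int :=
  pvGoA 0 procesos

-- ===== PORT B =====
-- prefix sums of the bursts: entry i is the sum of the bursts before i
def pvPrefixes (s : Int) : List Int → List Int
  | [] => []
  | b :: bs => s :: pvPrefixes (s + b) bs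

-- running maximum (seeded with 0) of the list (arrival_i - S_i)
def pvMaxes (m : Int) : List Int → List Int
  | [] => []
  | x :: xs => max m x :: pvMaxes (max m x) xs

def calcular_turnaround_waiting_time_alt (procesos : List (List (String × Int))) : List Int × List Int :=
  let arrivals := procesos.map pvArrival
  let bursts := procesos.map pvBurst
  let prefixes := pvPrefixes 0 bursts
  let maxes := pvMaxes 0 ((arrivals.zip prefixes).map (fun x => x.1 - x.2))
  let waiting_times := ((maxes.zip prefixes).zip arrivals).map (fun x => x.1.1 + x.1.2 - x.2)
  let turnaround_times := (waiting_times.zip bursts).map (fun x => x.1 + x.2)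
  (turnaround_times, waiting_times)

-- ===== PRECONDITION & SPEC =====
-- Pre_ excludes processes missing the 'ArrivalTime' or 'BurstTime' key, on which Python A raises KeyError.
def Pre_calcular_turnaround_waiting_time (procesos : List (List (String × Int))) : Prop :=
  ∀ p ∈ procesos, (p.lookup "ArrivalTime").isSome ∧ (p.lookup "BurstTime").isSome
instance (procesos : List (List (String × Int))) : Decidable (Pre_calcular_turnaround_waiting_time procesos) := by unfold Pre_calcular_turnaround_waiting_time; infer_instance

def pvWitness_calcular_turnaround_waiting_time : (List (List (String × Int))) :=
  [[("ArrivalTime", 2), ("BurstTime", 3)], [("ArrivalTime", 0), ("BurstTime", 1)]]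

def Spec_calcular_turnaround_waiting_time (procesos : List (List (String × Int))) (out : List Int × List Int) : Prop := out = calcular_turnaround_waiting_time_alt procesos
instance (procesos : List (List (String × Int))) (out : List Int × List Int) : Decidable (Spec_calcular_turnaround_waiting_time procesos out) := by unfold Spec_calcular_turnaround_waiting_time; infer_instance

-- ===== CLAIM (what is proved, stated in full; the proofs are below) =====
def Claim_equal_calcular_turnaround_waiting_time : Prop := ∀ (procesos : List (List (String × Int))), Dom_calcular_turnaround_waiting_time procesos → Pre_calcular_turnaround_waiting_time procesos → Spec_calcular_turnaround_waiting_time procesos (calcular_turnaround_waiting_time procesos)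

-- ===== LEMMAS AND PROOFS =====
-- Invariant: A's clock equals m + s, where s is the burst prefix sum and m the running maximum.
theorem pvGoA_eq_alt (ps : List (List (String × Int))) : ∀ (m s : Int),
    pvGoA (m + s) ps =
      (let arrivals := ps.map pvArrival
       let bursts := ps.map pvBurst
       let prefixes := pvPrefixes s bursts
       let maxes := pvMaxes m ((arrivals.zip prefixes).map (fun x => x.1 - x.2))
       let waiting_times := ((maxes.zip prefixes).zip arrivals).map (fun x => x.1.1 + x.1.2 - x.2)
       ((waiting_times.zip bursts).map (fun x => x.1 + x.2), waiting_times)) := by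
  induction ps with
  | nil => intro m s; simp [pvGoA, pvPrefixes, pvMaxes]
  | cons p ps ih =>
    intro m s
    have hclk : (if m + s < pvArrival p then pvArrival p else m + s)
        = max m (pvArrival p - s) + s := by
      rcases lt_or_ge (m + s) (pvArrival p) with h | h
      · rw [if_pos h, max_eq_right (by omega)]; omega
      · rw [if_neg (not_lt.mpr h), max_eq_left (by omega)]
    have hnext : max m (pvArrival p - s) + s + pvBurst p
        = max m (pvArrival p - s) + (s + pvBurst p) := by ring
    simp only [pvGoA, List.map_cons, pvPrefixes, pvMaxes, List.zip_cons_cons, hclk,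
      hnext, ih (max m (pvArrival p - s)) (s + pvBurst p)]
    rw [Prod.mk.injEq]
    constructor
    · congr 1
      ring
    · congr 1
      ring

-- ===== VERDICT (by name: the statement is the Claim_ definition above) =====
theorem calcular_turnaround_waiting_time_spec : Claim_equal_calcular_turnaround_waiting_time := by
  intro procesos _ _
  unfold Spec_calcular_turnaround_waiting_time calcular_turnaround_waiting_time calcular_turnaround_waiting_time_alt
  have h := pvGoA_eq_alt procesos 0 0
  simpa using h
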